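-- pv_equiv track=rewrite | github.com/Timryan3001/AOC2022 | day02.py | add_on_base_values
-- ===== SOURCE A (Python) =====
-- def add_on_base_values(tuples):
--     base_value = 0
--     for m1,m2 in tuples:
--         if m2 == 'X':
--             base_value += 1
--         elif m2 == 'Y':
--             base_value += 2
--         elif m2 == 'Z':
--             base_value += 3
--
--     return base_value
-- ===== SOURCE B (Python) =====
-- def add_on_base_values(tuples):
--     counts = {}
--     for _, m2 in tuples:
--         counts[m2] = counts.get(m2, 0) + 1
--     return counts.get('X', 0) + 2 * counts.get('Y', 0) + 3 * counts.get('Z', 0)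
-- ===== Notes on version B (the rewrite author's own statement) =====
-- stated objective: alternative
-- what changed: Replaces the per-element if/elif score accumulation with a two-phase tally: build a frequency table of the second components, then return the fixed weighted combination counts['X'] + 2*counts['Y'] + 3*counts['Z'].
import Mathlib
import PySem

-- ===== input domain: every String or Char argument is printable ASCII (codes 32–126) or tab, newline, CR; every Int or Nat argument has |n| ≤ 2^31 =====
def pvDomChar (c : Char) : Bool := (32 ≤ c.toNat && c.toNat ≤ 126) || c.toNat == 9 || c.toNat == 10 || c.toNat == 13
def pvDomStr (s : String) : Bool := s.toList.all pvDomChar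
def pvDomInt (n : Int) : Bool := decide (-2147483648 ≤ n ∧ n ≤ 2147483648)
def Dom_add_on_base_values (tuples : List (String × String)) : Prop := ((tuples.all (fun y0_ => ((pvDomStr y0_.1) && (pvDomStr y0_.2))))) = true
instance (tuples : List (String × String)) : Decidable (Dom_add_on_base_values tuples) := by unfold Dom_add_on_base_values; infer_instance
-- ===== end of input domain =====

-- B replaces A's per-element if/elif score accumulation with a two-phase tally
-- (frequency table of second components, then a fixed weighted combination); objective: alternative.


-- ===== PORT A =====
def add_on_base_values (tuples : List (String × String)) : Int :=
  tuples.foldl (fun base_value p =>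
    if p.2 == "X" then base_value + 1
    else if p.2 == "Y" then base_value + 2
    else if p.2 == "Z" then base_value + 3
    else base_value) 0

-- ===== PORT B =====
-- counts[m2] = counts.get(m2, 0) + 1 over the list, then the fixed weighted combination
def pvTally (tuples : List (String × String)) : PySem.Dict String Int :=
  tuples.foldl (fun counts p => counts.insert p.2 (counts.getD p.2 0 + 1)) PySem.Dict.empty

def add_on_base_values_alt (tuples : List (String × String)) : Int :=
  let counts := pvTally tuples
  counts.getD "X" 0 + 2 * counts.getD "Y" 0 + 3 * counts.getD "Z" 0

-- ===== PRECONDITION & SPEC =====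
def Spec_add_on_base_values (tuples : List (String × String)) (out : Int) : Prop := out = add_on_base_values_alt tuples
instance (tuples : List (String × String)) (out : Int) : Decidable (Spec_add_on_base_values tuples out) := by unfold Spec_add_on_base_values; infer_instance

-- ===== CLAIM (what is proved, stated in full; the proofs are below) =====
def Claim_equal_add_on_base_values : Prop := ∀ (tuples : List (String × String)), Dom_add_on_base_values tuples → Spec_add_on_base_values tuples (add_on_base_values tuples)

-- ===== LEMMAS AND PROOFS =====
-- the weighted combination B computes from a counts dict
def pvCombine (d : PySem.Dict String Int) : Int :=
  d.getD "X" 0 + 2 * d.getD "Y" 0 + 3 * d.getD "Z" 0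

lemma pvCombine_insert (d : PySem.Dict String Int) (m2 : String) :
    pvCombine (d.insert m2 (d.getD m2 0 + 1)) =
      pvCombine d + (if m2 == "X" then 1 else if m2 == "Y" then 2 else if m2 == "Z" then 3 else 0) := by
  by_cases hx : m2 = "X"
  · subst hx; simp [pvCombine, PySem.Dict.getD_insert]; ring
  · by_cases hy : m2 = "Y"
    · subst hy; simp [pvCombine, PySem.Dict.getD_insert]; ring
    · by_cases hz : m2 = "Z"
      · subst hz; simp [pvCombine, PySem.Dict.getD_insert]; ring
      · simp [pvCombine, PySem.Dict.getD_insert, hx, hy, hz, Ne.symm hx, Ne.symm hy, Ne.symm hz]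

lemma pv_key (l : List (String × String)) (d : PySem.Dict String Int) (a : Int) :
    (l.foldl (fun base_value p =>
      if p.2 == "X" then base_value + 1
      else if p.2 == "Y" then base_value + 2
      else if p.2 == "Z" then base_value + 3
      else base_value) a) + pvCombine d
    = a + pvCombine (l.foldl (fun counts p => counts.insert p.2 (counts.getD p.2 0 + 1)) d) := by
  induction l generalizing d a with
  | nil => simp
  | cons p l ih =>
    simp only [List.foldl_cons]
    have h := ih (d.insert p.2 (d.getD p.2 0 + 1))
      (if p.2 == "X" then a + 1 else if p.2 == "Y" then a + 2 else if p.2 == "Z" then a + 3 else a)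
    have hc := pvCombine_insert d p.2
    split_ifs at h hc ⊢ <;> omega

-- ===== VERDICT (by name: the statement is the Claim_ definition above) =====
theorem add_on_base_values_spec : Claim_equal_add_on_base_values := by
  intro tuples _
  unfold Spec_add_on_base_values add_on_base_values add_on_base_values_alt pvTally
  have h := pv_key tuples PySem.Dict.empty 0
  simp only [pvCombine] at h ⊢
  simp only [PySem.Dict.getD_empty] at h
  omega
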